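-- pv_equiv track=rewrite | github.com/EyeDeck/Advent-of-Code | EC2025/q5.py | construct_sword
-- ===== SOURCE A (Python) =====
-- def construct_sword(sword):
--     spine = [[None, sword[0], None]]
--     for i in sword[1:]:
--         for segment in spine:
--             if i < segment[1] and segment[0] is None:
--                 segment[0] = i
--                 break
--             elif i > segment[1] and segment[2] is None:
--                 segment[2] = i
--                 break
--         else:
--             spine.append([None, i, None])
--     return spine
-- ===== SOURCE B (Python) =====
-- # Segment-tree reimplementation: two tournament trees over segment positions
-- # (max-of-open-left-centers, min-of-open-right-centers) answer "leftmost segment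
-- # that can take x on this side" in O(log n), replacing A's linear rescan of the spine.
-- def construct_sword(sword):
--     def build(k):
--         # perfect-ish tree over k >= 1 positions; node = (size, best, left, right)
--         if k == 1:
--             return (1, None, None, None)
--         h = k // 2
--         l, r = build(h), build(k - h)
--         return (k, None, l, r)
--
--     def cmbmax(a, b):
--         if a is None:
--             return b
--         if b is None:
--             return a
--         return a if a > b else b
--
--     def cmbmin(a, b):
--         if a is None:
--             return b
--         if b is None:
--             return a
--         return a if a < b else b
--
--     def upd(t, pos, val, cmb):
--         size, b, l, r = t
--         if size == 1:
--             return (1, val, None, None)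
--         if pos < l[0]:
--             l = upd(l, pos, val, cmb)
--         else:
--             r = upd(r, pos - l[0], val, cmb)
--         return (size, cmb(l[1], r[1]), l, r)
--
--     def query(t, pred):
--         # leftmost position whose stored value satisfies pred; needs
--         # pred(cmb(a,b)) == pred(a) or pred(b), which holds for (cmbmax, >x) and (cmbmin, <x)
--         size, b, l, r = t
--         if not pred(b):
--             return None
--         if size == 1:
--             return 0
--         if pred(l[1]):
--             return query(l, pred)
--         return l[0] + query(r, pred)
--
--     n = len(sword)
--     cap = max(n, 1)
--     lefts, centers, rights = [], [], []
--     tl = build(cap)  # stores center of each segment whose LEFT slot is open, else None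
--     tr = build(cap)  # stores center of each segment whose RIGHT slot is open, else None
--     for x in sword:
--         jl = query(tl, lambda v: v is not None and v > x)
--         jr = query(tr, lambda v: v is not None and v < x)
--         if jl is None:
--             j = jr
--         elif jr is None:
--             j = jl
--         else:
--             j = min(jl, jr)
--         if j is None:
--             m = len(centers)
--             lefts.append(None)
--             centers.append(x)
--             rights.append(None)
--             tl = upd(tl, m, x, cmbmax)
--             tr = upd(tr, m, x, cmbmin)
--         elif x < centers[j]:
--             lefts[j] = x
--             tl = upd(tl, j, None, cmbmax)
--         else:
--             rights[j] = x
--             tr = upd(tr, j, None, cmbmin)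
--     return [[lefts[k], centers[k], rights[k]] for k in range(len(centers))]
-- ===== Notes on version B (the rewrite author's own statement) =====
-- stated objective: faster
-- what changed: Replaces A's linear rescan of the whole spine per element by two tournament (segment) trees over segment positions (max of open-left centers, min of open-right centers), each answering 'leftmost segment that can take x on this side' by O(log n) descent, with parallel lefts/centers/rights arrays instead of mutable segment triples.
import Mathlib
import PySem

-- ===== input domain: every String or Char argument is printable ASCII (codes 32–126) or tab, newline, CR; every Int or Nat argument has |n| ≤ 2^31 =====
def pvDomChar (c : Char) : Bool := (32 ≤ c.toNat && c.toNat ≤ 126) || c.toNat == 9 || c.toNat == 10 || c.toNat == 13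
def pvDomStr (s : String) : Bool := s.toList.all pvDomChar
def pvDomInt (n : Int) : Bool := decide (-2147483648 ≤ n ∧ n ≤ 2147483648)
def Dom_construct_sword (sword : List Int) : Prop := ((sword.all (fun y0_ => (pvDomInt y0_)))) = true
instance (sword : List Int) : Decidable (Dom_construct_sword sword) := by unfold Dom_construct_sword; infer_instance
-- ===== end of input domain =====

-- B replaces A's linear rescan of the spine by two tournament (segment) trees over
-- segment positions, answering "leftmost segment that can take x on this side" by descent.

-- ===== PORT A =====
-- inner 'for segment in spine: … break / else: append' rendered as structural find-and-replace
def stepA (spine : List (Option Int × Int × Option Int)) (i : Int) :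
    List (Option Int × Int × Option Int) :=
  match spine with
  | [] => [(none, i, none)]                      -- for-else: no segment took i, append
  | (l, c, r) :: rest =>
    if i < c ∧ l = none then (some i, c, r) :: rest
    else if i > c ∧ r = none then (l, c, some i) :: rest
    else (l, c, r) :: stepA rest i

def construct_sword (sword : List Int) : List (List (Option Int)) :=
  match sword with
  | [] => []                                     -- Python raises IndexError here (outside Pre_)
  | x :: rest =>
    (rest.foldl stepA [(none, x, none)]).map (fun s => [s.1, some s.2.1, s.2.2])

-- ===== PORT B =====
inductive PTree where
  | leaf (v : Option Int)
  | node (size : Nat) (best : Option Int) (l r : PTree)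
deriving DecidableEq, Repr

def tsize : PTree → Nat
  | .leaf _ => 1
  | .node k _ _ _ => k

def tbest : PTree → Option Int
  | .leaf v => v
  | .node _ b _ _ => b

def cmbmax (a b : Option Int) : Option Int :=
  match a, b with
  | none, b => b
  | a, none => a
  | some a, some b => some (if a > b then a else b)

def cmbmin (a b : Option Int) : Option Int :=
  match a, b with
  | none, b => b
  | a, none => a
  | some a, some b => some (if a < b then a else b)

-- Python's build is called with k ≥ 1 only; k = 0 is mapped to the k = 1 leaf to stay total
def build (k : Nat) : PTree :=
  if h : k ≤ 1 then .leaf none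
  else .node k none (build (k / 2)) (build (k - k / 2))
decreasing_by all_goals omega

def upd (t : PTree) (pos : Nat) (val : Option Int) (cmb : Option Int → Option Int → Option Int) :
    PTree :=
  match t with
  | .leaf _ => .leaf val
  | .node k _ l r =>
    let l' := if pos < tsize l then upd l pos val cmb else l
    let r' := if pos < tsize l then r else upd r (pos - tsize l) val cmb
    .node k (cmb (tbest l') (tbest r')) l' r'

def query (t : PTree) (pred : Option Int → Bool) : Option Nat :=
  match t with
  | .leaf v => if pred v then some 0 else none
  | .node _ b l r =>
    if ¬ pred b then none
    else if pred (tbest l) then query l pred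
    else (query r pred).map (tsize l + ·)

structure BState where
  lefts : List (Option Int)
  centers : List Int
  rights : List (Option Int)
  tl : PTree
  tr : PTree
deriving DecidableEq, Repr

def stepB (st : BState) (x : Int) : BState :=
  let jl := query st.tl (fun v => match v with | some c => decide (x < c) | none => false)
  let jr := query st.tr (fun v => match v with | some c => decide (c < x) | none => false)
  let j? : Option Nat :=
    match jl, jr with
    | none, jr => jr
    | jl, none => jl
    | some a, some b => some (min a b)
  match j? with
  | none =>
    let m := st.centers.length
    ⟨st.lefts ++ [none], st.centers ++ [x], st.rights ++ [none],
     upd st.tl m (some x) cmbmax, upd st.tr m (some x) cmbmin⟩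
  | some j =>
    if x < st.centers.getD j 0 then
      ⟨st.lefts.set j (some x), st.centers, st.rights, upd st.tl j none cmbmax, st.tr⟩
    else
      ⟨st.lefts, st.centers, st.rights.set j (some x), st.tl, upd st.tr j none cmbmin⟩

def construct_sword_alt (sword : List Int) : List (List (Option Int)) :=
  let cap := max sword.length 1
  let st := sword.foldl stepB ⟨[], [], [], build cap, build cap⟩
  (List.range st.centers.length).map
    (fun k => [st.lefts.getD k none, some (st.centers.getD k 0), st.rights.getD k none])

-- ===== PRECONDITION & SPEC =====
-- Pre_ excludes only the empty list, on which A raises IndexError at its first-element access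
def Pre_construct_sword (sword : List Int) : Prop := sword ≠ []
instance (sword : List Int) : Decidable (Pre_construct_sword sword) := by
  unfold Pre_construct_sword; infer_instance
def pvWitness_construct_sword : List Int := [3, 1, 4, 1, 5]

def Spec_construct_sword (sword : List Int) (out : List (List (Option Int))) : Prop :=
  out = construct_sword_alt sword
instance (sword : List Int) (out : List (List (Option Int))) :
    Decidable (Spec_construct_sword sword out) := by unfold Spec_construct_sword; infer_instance

-- ===== CLAIM (what is proved, stated in full; the proofs are below) =====
def Claim_equal_construct_sword : Prop := ∀ (sword : List Int), Dom_construct_sword sword →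
  Pre_construct_sword sword → Spec_construct_sword sword (construct_sword sword)

-- ===== LEMMAS AND PROOFS =====

-- tree abstraction -----------------------------------------------------------
def flatT : PTree → List (Option Int)
  | .leaf v => [v]
  | .node _ _ l r => flatT l ++ flatT r

def wfT (cmb : Option Int → Option Int → Option Int) : PTree → Prop
  | .leaf _ => True
  | .node k b l r => k = tsize l + tsize r ∧ b = cmb (tbest l) (tbest r) ∧ wfT cmb l ∧ wfT cmb r

theorem flatT_length (cmb : Option Int → Option Int → Option Int) (t : PTree)
    (h : wfT cmb t) : (flatT t).length = tsize t := by
  induction t with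
  | leaf v => simp [flatT, tsize]
  | node k b l r ihl ihr =>
    obtain ⟨hk, _, hl, hr⟩ := h
    simp [flatT, tsize, hk, ihl hl, ihr hr]

theorem tbest_any (cmb : Option Int → Option Int → Option Int) (pred : Option Int → Bool)
    (hom : ∀ a b, pred (cmb a b) = (pred a || pred b)) (t : PTree) (h : wfT cmb t) :
    pred (tbest t) = (flatT t).any pred := by
  induction t with
  | leaf v => simp [flatT, tbest]
  | node k b l r ihl ihr =>
    obtain ⟨_, hb, hl, hr⟩ := h
    show pred b = _
    rw [hb, hom, ihl hl, ihr hr, flatT, List.any_append]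

theorem query_eq (cmb : Option Int → Option Int → Option Int) (pred : Option Int → Bool)
    (hom : ∀ a b, pred (cmb a b) = (pred a || pred b)) (t : PTree) (h : wfT cmb t) :
    query t pred = (flatT t).findIdx? pred := by
  induction t with
  | leaf v => simp [flatT, query, List.findIdx?_cons]
  | node k b l r ihl ihr =>
    obtain ⟨hk, hb, hl, hr⟩ := h
    have hball : pred b = ((flatT l).any pred || (flatT r).any pred) := by
      have := tbest_any cmb pred hom (.node k b l r) ⟨hk, hb, hl, hr⟩
      rw [show tbest (.node k b l r) = b from rfl, flatT, List.any_append] at this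
      exact this
    rw [query, flatT, List.findIdx?_append]
    by_cases hp : pred b
    · rw [if_neg (by simp [hp])]
      by_cases hpl : pred (tbest l)
      · have : ((flatT l).findIdx? pred).isSome = true := by
          rw [List.findIdx?_isSome, ← tbest_any cmb pred hom l hl, hpl]
        obtain ⟨i, hi⟩ := Option.isSome_iff_exists.mp this
        rw [if_pos hpl, ihl hl]
        simp [hi]
      · have hnl : (flatT l).findIdx? pred = none := by
          rw [← Option.not_isSome_iff_eq_none, List.findIdx?_isSome,
            ← tbest_any cmb pred hom l hl]
          simp [hpl]
        rw [if_neg hpl, ihr hr, hnl]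
        cases hq : (flatT r).findIdx? pred <;>
          simp [flatT_length cmb l hl, Nat.add_comm]
    · have hbf : pred b = false := by simpa using hp
      rw [hbf] at hball
      have h1 : (flatT l).findIdx? pred = none := by
        rw [← Option.not_isSome_iff_eq_none, List.findIdx?_isSome]
        simp_all
      have h2 : (flatT r).findIdx? pred = none := by
        rw [← Option.not_isSome_iff_eq_none, List.findIdx?_isSome]
        simp_all
      simp [hp, h1, h2]

theorem upd_size (t : PTree) (pos : Nat) (v : Option Int)
    (cmb : Option Int → Option Int → Option Int) : tsize (upd t pos v cmb) = tsize t := by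
  cases t <;> simp [upd, tsize] <;> split <;> simp [tsize]

theorem upd_wf (cmb : Option Int → Option Int → Option Int) (t : PTree) (pos : Nat)
    (v : Option Int) (h : wfT cmb t) : wfT cmb (upd t pos v cmb) := by
  induction t generalizing pos with
  | leaf w => trivial
  | node k b l r ihl ihr =>
    obtain ⟨hk, hb, hl, hr⟩ := h
    by_cases hp : pos < tsize l <;>
      simp [upd, wfT, hp, upd_size, hk, ihl _ hl, ihr _ hr, hl, hr]

theorem upd_flat (cmb : Option Int → Option Int → Option Int) (t : PTree) (pos : Nat)
    (v : Option Int) (h : wfT cmb t) (hpos : pos < tsize t) :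
    flatT (upd t pos v cmb) = (flatT t).set pos v := by
  induction t generalizing pos with
  | leaf w =>
    have : pos = 0 := by simp [tsize] at hpos; omega
    simp [upd, flatT, this]
  | node k b l r ihl ihr =>
    obtain ⟨hk, hb, hl, hr⟩ := h
    by_cases hp : pos < tsize l
    · simp [upd, flatT, hp, ihl _ hl hp, List.set_append, flatT_length cmb l hl]
    · have hpr : pos - tsize l < tsize r := by
        rw [tsize] at hpos; omega
      simp [upd, flatT, hp, ihr _ hr hpr, List.set_append, flatT_length cmb l hl]

theorem build_ok (cmb : Option Int → Option Int → Option Int) (hnn : cmb none none = none)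
    (k : Nat) :
    wfT cmb (build k) ∧ tsize (build k) = max k 1 ∧
      flatT (build k) = List.replicate (max k 1) none ∧ tbest (build k) = none := by
  induction k using Nat.strong_induction_on with
  | _ k ih =>
    rw [build]
    by_cases h : k ≤ 1
    · rw [dif_pos h]
      refine ⟨trivial, ?_, ?_, rfl⟩
      · simp [tsize]; omega
      · have : max k 1 = 1 := by omega
        simp [flatT, this]
    · rw [dif_neg h]
      obtain ⟨w1, s1, f1, b1⟩ := ih (k / 2) (by omega)
      obtain ⟨w2, s2, f2, b2⟩ := ih (k - k / 2) (by omega)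
      refine ⟨⟨by show k = tsize _ + tsize _; rw [s1, s2]; omega, by rw [b1, b2, hnn], w1, w2⟩,
        by simp [tsize]; omega, ?_, rfl⟩
      rw [flatT, f1, f2, ← List.replicate_add]
      congr 1
      omega

-- predicates and their homomorphism over the combiners -------------------------
def predL (x : Int) (v : Option Int) : Bool :=
  match v with | some c => decide (x < c) | none => false

def predR (x : Int) (v : Option Int) : Bool :=
  match v with | some c => decide (c < x) | none => false

theorem homL (x : Int) : ∀ a b, predL x (cmbmax a b) = (predL x a || predL x b) := by
  intro a b
  cases a <;> cases b <;> simp [cmbmax, predL]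
  split <;> rw [Bool.eq_iff_iff] <;> simp <;> omega

theorem homR (x : Int) : ∀ a b, predR x (cmbmin a b) = (predR x a || predR x b) := by
  intro a b
  cases a <;> cases b <;> simp [cmbmin, predR]
  split <;> rw [Bool.eq_iff_iff] <;> simp <;> omega

-- optional-minimum and findIdx? of a disjunction --------------------------------
def omin : Option Nat → Option Nat → Option Nat
  | none, b => b
  | a, none => a
  | some a, some b => some (min a b)

theorem findIdx?_or (p q : α → Bool) (xs : List α) :
    xs.findIdx? (fun v => p v || q v) = omin (xs.findIdx? p) (xs.findIdx? q) := by
  induction xs with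
  | nil => rfl
  | cons h t ih =>
    simp only [List.findIdx?_cons, ih]
    by_cases hp : p h <;> by_cases hq : q h <;>
      simp [hp, hq, omin] <;>
      cases ht : t.findIdx? p <;> cases hu : t.findIdx? q <;>
        simp [omin] <;> omega

-- A-side: one pass of the inner loop, characterised by findIdx? -----------------
def hitL (x : Int) (s : Option Int × Int × Option Int) : Bool :=
  decide (x < s.2.1) && (s.1 == none)

def hitR (x : Int) (s : Option Int × Int × Option Int) : Bool :=
  decide (s.2.1 < x) && (s.2.2 == none)

def hit (x : Int) (s : Option Int × Int × Option Int) : Bool := hitL x s || hitR x s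

def upseg (x : Int) (s : Option Int × Int × Option Int) : Option Int × Int × Option Int :=
  if x < s.2.1 then (some x, s.2.1, s.2.2) else (s.1, s.2.1, some x)

theorem stepA_none (x : Int) (spine : List (Option Int × Int × Option Int))
    (h : spine.findIdx? (hit x) = none) : stepA spine x = spine ++ [(none, x, none)] := by
  induction spine with
  | nil => rfl
  | cons s t ih =>
    obtain ⟨l, c, r⟩ := s
    rw [List.findIdx?_cons] at h
    by_cases hs : hit x (l, c, r)
    · simp [hs] at h
    · have h1 : ¬(x < c ∧ l = none) := by
        simp [hit, hitL, hitR] at hs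
        intro ⟨a, b⟩; exact absurd (hs.1 a) (by simp [b])
      have h2 : ¬(x > c ∧ r = none) := by
        simp [hit, hitL, hitR] at hs
        intro ⟨a, b⟩; exact absurd (hs.2 a) (by simp [b])
      rw [stepA, if_neg h1, if_neg h2]
      simp [hs] at h
      rw [ih (List.findIdx?_eq_none_iff.mpr (fun y hy => by
        obtain ⟨a, b, c⟩ := y
        exact h a b c hy))]
      simp

theorem stepA_some (x : Int) (spine : List (Option Int × Int × Option Int)) (j : Nat)
    (h : spine.findIdx? (hit x) = some j) :
    stepA spine x = spine.set j (upseg x (spine.getD j (none, 0, none))) := by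
  induction spine generalizing j with
  | nil => simp at h
  | cons s t ih =>
    obtain ⟨l, c, r⟩ := s
    rw [List.findIdx?_cons] at h
    by_cases hs : hit x (l, c, r)
    · rw [if_pos hs] at h
      obtain rfl : j = 0 := by simpa using h.symm
      simp only [hit, hitL, hitR, Bool.or_eq_true, Bool.and_eq_true, decide_eq_true_eq,
        beq_iff_eq] at hs
      by_cases hx : x < c
      · have hl : l = none := by
          rcases hs with ⟨_, hl⟩ | ⟨hc, _⟩
          · exact hl
          · omega
        rw [stepA, if_pos ⟨hx, hl⟩]
        simp [upseg, hx, hl]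
      · have hcr : c < x ∧ r = none := by
          rcases hs with ⟨hc, _⟩ | h
          · omega
          · exact h
        rw [stepA, if_neg (by tauto), if_pos ⟨hcr.1, hcr.2⟩]
        simp [upseg, hx]
    · rw [if_neg hs] at h
      have h1 : ¬(x < c ∧ l = none) := by
        simp [hit, hitL, hitR] at hs
        intro ⟨a, b⟩; exact absurd (hs.1 a) (by simp [b])
      have h2 : ¬(x > c ∧ r = none) := by
        simp [hit, hitL, hitR] at hs
        intro ⟨a, b⟩; exact absurd (hs.2 a) (by simp [b])
      obtain ⟨j', hj', rfl⟩ : ∃ j', t.findIdx? (hit x) = some j' ∧ j = j' + 1 := by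
        cases ht : t.findIdx? (hit x) with
        | none => rw [ht] at h; simp at h
        | some v => rw [ht] at h; exact ⟨v, rfl, by simpa using h.symm⟩
      rw [stepA, if_neg h1, if_neg h2, ih j' hj']
      simp

-- masks: what the two trees store for a given spine ------------------------------
def maskL (spine : List (Option Int × Int × Option Int)) : List (Option Int) :=
  spine.map (fun s => if s.1 = none then some s.2.1 else none)

def maskR (spine : List (Option Int × Int × Option Int)) : List (Option Int) :=
  spine.map (fun s => if s.2.2 = none then some s.2.1 else none)

-- the coupling invariant between A's spine and B's state -------------------------
def SInv (cap : Nat) (spine : List (Option Int × Int × Option Int)) (st : BState) : Prop :=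
  st.lefts = spine.map (·.1) ∧ st.centers = spine.map (·.2.1) ∧
  st.rights = spine.map (·.2.2) ∧
  wfT cmbmax st.tl ∧ wfT cmbmin st.tr ∧ tsize st.tl = cap ∧ tsize st.tr = cap ∧
  flatT st.tl = maskL spine ++ List.replicate (cap - spine.length) none ∧
  flatT st.tr = maskR spine ++ List.replicate (cap - spine.length) none

theorem map_set_eq_self {α β : Type} (f : α → β) (l : List α) (j : Nat) (a : α)
    (hj : j < l.length) (h : f a = f (l[j])) : (l.set j a).map f = l.map f := by
  rw [List.map_set, h, ← List.getElem_map (f := f), List.set_getElem_self]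
  simpa using hj

theorem SInv_step (cap : Nat) (x : Int) (spine : List (Option Int × Int × Option Int))
    (st : BState) (hcap : spine.length < cap) (hInv : SInv cap spine st) :
    SInv cap (stepA spine x) (stepB st x) ∧ (stepA spine x).length ≤ spine.length + 1 := by
  obtain ⟨hle, hce, hri, hwl, hwr, hsl, hsr, hfl, hfr⟩ := hInv
  have hmlen : (maskL spine).length = spine.length := by simp [maskL]
  have hmrlen : (maskR spine).length = spine.length := by simp [maskR]
  have hclen : st.centers.length = spine.length := by rw [hce]; simp
  have hql : query st.tl (fun v => match v with | some c => decide (x < c) | none => false)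
      = spine.findIdx? (hitL x) := by
    show query st.tl (predL x) = List.findIdx? (hitL x) spine
    rw [query_eq cmbmax _ (homL x) st.tl hwl, hfl, List.findIdx?_append]
    have h1 : List.findIdx? (predL x)
        (List.replicate (cap - spine.length) (none : Option Int)) = none := by
      simp [List.findIdx?_replicate, predL]
    rw [h1, maskL, List.findIdx?_map]
    simp only [Option.map_none, Option.or_none]
    congr 1
    funext s
    obtain ⟨l, c, r⟩ := s
    cases l <;> simp [hitL, Function.comp, predL]
  have hqr : query st.tr (fun v => match v with | some c => decide (c < x) | none => false)
      = spine.findIdx? (hitR x) := by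
    show query st.tr (predR x) = List.findIdx? (hitR x) spine
    rw [query_eq cmbmin _ (homR x) st.tr hwr, hfr, List.findIdx?_append]
    have h1 : List.findIdx? (predR x)
        (List.replicate (cap - spine.length) (none : Option Int)) = none := by
      simp [List.findIdx?_replicate, predR]
    rw [h1, maskR, List.findIdx?_map]
    simp only [Option.map_none, Option.or_none]
    congr 1
    funext s
    obtain ⟨l, c, r⟩ := s
    cases r <;> simp [hitR, Function.comp, predR]
  have hcomb : (match spine.findIdx? (hitL x), spine.findIdx? (hitR x) with
      | none, jr => jr | jl, none => jl
      | some a, some b => some (min a b)) = spine.findIdx? (hit x) := by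
    have h := findIdx?_or (hitL x) (hitR x) spine
    rw [show (fun v => hitL x v || hitR x v) = hit x from funext (fun s => rfl)] at h
    rw [h]
    cases spine.findIdx? (hitL x) <;> cases spine.findIdx? (hitR x) <;> rfl
  have hB : stepB st x = (match spine.findIdx? (hit x) with
      | none => (⟨st.lefts ++ [none], st.centers ++ [x], st.rights ++ [none],
          upd st.tl st.centers.length (some x) cmbmax,
          upd st.tr st.centers.length (some x) cmbmin⟩ : BState)
      | some j => if x < st.centers.getD j 0 then
            ⟨st.lefts.set j (some x), st.centers, st.rights, upd st.tl j none cmbmax, st.tr⟩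
          else
            ⟨st.lefts, st.centers, st.rights.set j (some x), st.tl,
              upd st.tr j none cmbmin⟩) := by
    simp only [stepB, hql, hqr, hcomb]
  cases hfind : spine.findIdx? (hit x) with
  | none =>
    rw [stepA_none x spine hfind, hB]
    simp only [hfind]
    have hpos : st.centers.length < tsize st.tl := by rw [hsl, hclen]; exact hcap
    have hpos' : st.centers.length < tsize st.tr := by rw [hsr, hclen]; exact hcap
    refine ⟨⟨?_, ?_, ?_, upd_wf _ _ _ _ hwl, upd_wf _ _ _ _ hwr,
      by rw [upd_size, hsl], by rw [upd_size, hsr], ?_, ?_⟩, by simp⟩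
    · rw [hle]; simp
    · rw [hce]; simp
    · rw [hri]; simp
    · rw [upd_flat cmbmax st.tl _ _ hwl hpos, hfl, hclen, List.set_append,
        if_neg (by omega), hmlen, Nat.sub_self,
        show cap - spine.length = (cap - (spine.length + 1)) + 1 from by omega,
        List.replicate_succ]
      simp [maskL]
    · rw [upd_flat cmbmin st.tr _ _ hwr hpos', hfr, hclen, List.set_append,
        if_neg (by omega), hmrlen, Nat.sub_self,
        show cap - spine.length = (cap - (spine.length + 1)) + 1 from by omega,
        List.replicate_succ]
      simp [maskR]
  | some j =>
    obtain ⟨hjlen, hhit, -⟩ := List.findIdx?_eq_some_iff_getElem.mp hfind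
    have hcj : st.centers.getD j 0 = spine[j].2.1 := by
      rw [hce, List.getD_eq_getElem _ _ (by simpa using hjlen), List.getElem_map]
    have hgetD : spine.getD j (none, 0, none) = spine[j] := List.getD_eq_getElem _ _ hjlen
    have hhit' : (x < spine[j].2.1 ∧ spine[j].1 = none) ∨
        (spine[j].2.1 < x ∧ spine[j].2.2 = none) := by
      simpa [hit, hitL, hitR] using hhit
    have hjl : j < tsize st.tl := by rw [hsl]; omega
    have hjr : j < tsize st.tr := by rw [hsr]; omega
    rw [stepA_some x spine j hfind, hgetD, hB]
    simp only [hfind]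
    by_cases hx : x < spine[j].2.1
    · have hl : spine[j].1 = none := by
        rcases hhit' with ⟨_, h⟩ | ⟨h, _⟩
        · exact h
        · omega
      rw [if_pos (by rw [hcj]; exact hx), upseg, if_pos hx]
      refine ⟨⟨?_, ?_, ?_, upd_wf _ _ _ _ hwl, hwr, by rw [upd_size, hsl], hsr, ?_, ?_⟩,
        by simp⟩
      · rw [hle, List.map_set]
      · rw [hce]; exact (map_set_eq_self _ _ _ _ hjlen (by rfl)).symm
      · rw [hri]; exact (map_set_eq_self _ _ _ _ hjlen (by rfl)).symm
      · rw [upd_flat cmbmax st.tl _ _ hwl hjl, hfl, List.set_append, if_pos (by omega),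
          List.length_set]
        congr 1
        simp only [maskL]
        rw [List.map_set]
        simp [hl]
      · rw [hfr, List.length_set]
        congr 1
        simp only [maskR]
        exact (map_set_eq_self _ _ _ _ hjlen (by rfl)).symm
    · have hr : spine[j].2.1 < x ∧ spine[j].2.2 = none := by
        rcases hhit' with ⟨h, _⟩ | h
        · omega
        · exact h
      rw [if_neg (by rw [hcj]; exact hx), upseg, if_neg hx]
      refine ⟨⟨?_, ?_, ?_, hwl, upd_wf _ _ _ _ hwr, hsl, by rw [upd_size, hsr], ?_, ?_⟩,
        by simp⟩
      · rw [hle]; exact (map_set_eq_self _ _ _ _ hjlen (by rfl)).symm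
      · rw [hce]; exact (map_set_eq_self _ _ _ _ hjlen (by rfl)).symm
      · rw [hri, List.map_set]
      · rw [hfl, List.length_set]
        congr 1
        simp only [maskL]
        exact (map_set_eq_self _ _ _ _ hjlen (by rfl)).symm
      · rw [upd_flat cmbmin st.tr _ _ hwr hjr, hfr, List.set_append, if_pos (by omega),
          List.length_set]
        congr 1
        simp only [maskR]
        rw [List.map_set]
        simp [hr.2]

theorem SInv_fold (cap : Nat) (rest : List Int) :
    ∀ (spine : List (Option Int × Int × Option Int)) (st : BState), SInv cap spine st →
      spine.length + rest.length ≤ cap →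
      SInv cap (rest.foldl stepA spine) (rest.foldl stepB st) := by
  induction rest with
  | nil => intro spine st h _; simpa using h
  | cons y t ih =>
    intro spine st h hlen
    simp only [List.foldl_cons]
    obtain ⟨h1, h2⟩ := SInv_step cap y spine st (by simp at hlen; omega) h
    exact ih _ _ h1 (by simp at hlen ⊢; omega)

theorem SInv_init (cap : Nat) (hcap : 1 ≤ cap) :
    SInv cap [] ⟨[], [], [], build cap, build cap⟩ := by
  obtain ⟨wl, sl, fl, -⟩ := build_ok cmbmax rfl cap
  obtain ⟨wr, sr, fr, -⟩ := build_ok cmbmin rfl cap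
  have hm : max cap 1 = cap := by omega
  rw [hm] at sl fl sr fr
  exact ⟨rfl, rfl, rfl, wl, wr, sl, sr, by simp [fl, maskL], by simp [fr, maskR]⟩

theorem final_eq (cap : Nat) (spine : List (Option Int × Int × Option Int)) (st : BState)
    (h : SInv cap spine st) :
    (List.range st.centers.length).map
      (fun k => [st.lefts.getD k none, some (st.centers.getD k 0), st.rights.getD k none])
      = spine.map (fun s => [s.1, some s.2.1, s.2.2]) := by
  obtain ⟨hle, hce, hri, -⟩ := h
  apply List.ext_getElem
  · simp [hce]
  · intro i h1 h2
    have hi : i < spine.length := by simpa using h2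
    simp only [List.getElem_map, List.getElem_range]
    rw [List.getD_eq_getElem _ _ (by simp [hle, hi]),
      List.getD_eq_getElem _ _ (by simp [hce, hi]),
      List.getD_eq_getElem _ _ (by simp [hri, hi])]
    simp [hle, hce, hri]

-- ===== VERDICT (by name: the statement is the Claim_ definition above) =====
theorem construct_sword_spec : Claim_equal_construct_sword := by
  intro sword hdom hpre
  show construct_sword sword = construct_sword_alt sword
  cases sword with
  | nil => exact absurd rfl hpre
  | cons x rest =>
    rw [construct_sword, construct_sword_alt]
    simp only [List.foldl_cons]
    have hcap : max (x :: rest).length 1 = rest.length + 1 := by simp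
    have h0 : SInv (max (x :: rest).length 1) [] ⟨[], [], [], build (max (x :: rest).length 1),
        build (max (x :: rest).length 1)⟩ := SInv_init _ (by omega)
    obtain ⟨h1, -⟩ := SInv_step (max (x :: rest).length 1) x [] _ (by simp) h0
    have h2 := SInv_fold (max (x :: rest).length 1) rest _ _ h1
      (by simp only [stepA, hcap]; simp; omega)
    exact (final_eq _ _ _ h2).symm
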